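-- pv_equiv track=rewrite | github.com/GCHeroes1/Idle-Slayer-Calculator | StonesOfTime.py | fetch_usp_values
-- ===== SOURCE A (Python) =====
-- def process_usp(value):
--     bound = 20
--     if value - bound < 0:
--         return 0, value + bound
--     return value - bound, value + bound
--
-- def fetch_usp_values(current_usp_allocation):
--     # current_usp_allocation = {
--     #     "Idle": "3",
--     #     "Activity": "32",
--     #     "Hope": "33",
--     #     "Rage": "19"
--     # }
--     current_usp = 0
--     idle_min, idle_max, active_min, active_max, hope_min, hope_max, rage_min, rage_max = 0, 0, 0, 0, 0, 0, 0, 0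
--     if "Idle" in current_usp_allocation:
--         current_usp += int(current_usp_allocation["Idle"])
--         # idle_min, idle_max = int(current_usp_allocation["Idle"]), int(current_usp_allocation["Idle"])
--         idle_min, idle_max = process_usp(int(current_usp_allocation["Idle"]))
--     if "Activity" in current_usp_allocation:
--         current_usp += int(current_usp_allocation["Activity"])
--         active_min, active_max = process_usp(int(current_usp_allocation["Activity"]))
--     if "Hope" in current_usp_allocation:
--         current_usp += int(current_usp_allocation["Hope"])
--         hope_min, hope_max = process_usp(int(current_usp_allocation["Hope"]))
--     if "Rage" in current_usp_allocation:
--         current_usp += int(current_usp_allocation["Rage"])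
--         # rage_min, rage_max = int(current_usp_allocation["Rage"]), int(current_usp_allocation["Rage"])
--         rage_min, rage_max = process_usp(int(current_usp_allocation["Rage"]))
--     values = []
--     step = 2
--     for active in range(active_min, active_max + 1, step):
--         for idle in range(idle_min, idle_max + 1, step):
--             for hope in range(hope_min, hope_max + 1, step):
--                 for rage in range(rage_min, rage_max + 1, step):
--                     if active + idle + hope + rage == current_usp:
--                         USP_allocation = {
--                             "Idle": idle,
--                             "Activity": active,
--                             "Hope": hope,
--                             "Rage": rage
--                         }
--                         values.append(USP_allocation)
--     return values
-- ===== SOURCE B (Python) =====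
-- def fetch_usp_values(current_usp_allocation):
--     # single prologue pass: total USP and per-key (lo, hi) bounds
--     total = 0
--     bounds = {}
--     for key in ("Idle", "Activity", "Hope", "Rage"):
--         if key in current_usp_allocation:
--             v = int(current_usp_allocation[key])
--             total += v
--             lo = v - 20
--             if lo < 0:
--                 lo = 0
--             bounds[key] = (lo, v + 20)
--         else:
--             bounds[key] = (0, 0)
--
--     order = ["Activity", "Idle", "Hope", "Rage"]
--
--     def solve(fields, remaining, picked):
--         name, (lo, hi) = fields[0]
--         if len(fields) == 1:
--             # last variable is determined by the sum constraint:
--             # membership in range(lo, hi + 1, 2) = bounds + parity check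
--             if lo <= remaining <= hi and (remaining - lo) % 2 == 0:
--                 alloc = dict(picked)
--                 alloc[name] = remaining
--                 return [{"Idle": alloc["Idle"], "Activity": alloc["Activity"],
--                          "Hope": alloc["Hope"], "Rage": alloc["Rage"]}]
--             return []
--         out = []
--         for v in range(lo, hi + 1, 2):
--             out.extend(solve(fields[1:], remaining - v, picked + [(name, v)]))
--         return out
--
--     return solve([(name, bounds[name]) for name in order], total, [])
-- ===== Notes on version B (the rewrite author's own statement) =====
-- stated objective: alternative
-- what changed: B replaces A's four fixed nested loops with a recursive search over a list of (name, lo, hi) fields that consumes a remaining-sum budget and, at the last field, determines its value directly from the sum constraint (bounds + parity check) instead of scanning A's innermost range; the prologue is a single loop over the four keys building a bounds dict instead of four copied if-blocks.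
import Mathlib
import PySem

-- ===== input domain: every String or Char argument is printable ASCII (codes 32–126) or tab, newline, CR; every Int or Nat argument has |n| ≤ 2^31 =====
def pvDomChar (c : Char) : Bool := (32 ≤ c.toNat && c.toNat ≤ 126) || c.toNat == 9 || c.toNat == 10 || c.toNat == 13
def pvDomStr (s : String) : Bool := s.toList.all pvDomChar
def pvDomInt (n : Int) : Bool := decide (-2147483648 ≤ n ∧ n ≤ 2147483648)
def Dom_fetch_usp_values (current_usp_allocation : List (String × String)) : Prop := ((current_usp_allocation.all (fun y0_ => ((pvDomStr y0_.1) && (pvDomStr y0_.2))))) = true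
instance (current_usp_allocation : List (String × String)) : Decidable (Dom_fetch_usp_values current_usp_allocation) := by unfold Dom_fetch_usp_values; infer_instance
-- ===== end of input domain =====

-- B replaces A's four nested loops by a recursive search over a field list that determines the
-- last variable directly from the sum constraint (objective: alternative algorithm; same results).


-- ===== PORT A =====
-- dict lookup on the association list (first match), per the type convention
def lookupUsp (d : List (String × String)) (k : String) : Option String :=
  (d.find? (fun p => p.1 == k)).map (·.2)

def process_usp (value : Int) : Int × Int :=
  if value - 20 < 0 then (0, value + 20) else (value - 20, value + 20)

-- one 'if key in d: current_usp += int(d[key]); mn, mx = process_usp(int(d[key]))' block;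
-- int(...) is PySem.Int.ofStr?, Pre_ guarantees it parses
def uspRead (d : List (String × String)) (k : String) (cu : Int) : Int × Int × Int :=
  match lookupUsp d k with
  | some s =>
      let v := (PySem.Int.ofStr? s).getD 0
      let p := process_usp v
      (cu + v, p.1, p.2)
  | none => (cu, 0, 0)

def fetch_usp_values (current_usp_allocation : List (String × String)) : List (List (String × Int)) :=
  let r1 := uspRead current_usp_allocation "Idle" 0
  let idle_min := r1.2.1; let idle_max := r1.2.2
  let r2 := uspRead current_usp_allocation "Activity" r1.1
  let active_min := r2.2.1; let active_max := r2.2.2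
  let r3 := uspRead current_usp_allocation "Hope" r2.1
  let hope_min := r3.2.1; let hope_max := r3.2.2
  let r4 := uspRead current_usp_allocation "Rage" r3.1
  let rage_min := r4.2.1; let rage_max := r4.2.2
  let current_usp := r4.1
  (PySem.List.pyRange active_min (active_max + 1) 2).foldl (fun values active =>
    (PySem.List.pyRange idle_min (idle_max + 1) 2).foldl (fun values idle =>
      (PySem.List.pyRange hope_min (hope_max + 1) 2).foldl (fun values hope =>
        (PySem.List.pyRange rage_min (rage_max + 1) 2).foldl (fun values rage =>
          if active + idle + hope + rage == current_usp then
            values ++ [[("Idle", idle), ("Activity", active), ("Hope", hope), ("Rage", rage)]]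
          else values) values) values) values) []

-- ===== PORT B =====
-- the leaf's dict rebuild: alloc = dict(picked); alloc[name] = remaining; then the
-- output dict in the fixed key order (every key is present by construction, so the
-- Python KeyError branch is unreachable; getD's default is never read)
def assembleUsp (alloc : List (String × Int)) : List (String × Int) :=
  [("Idle", PySem.Dict.getD (PySem.Dict.mk alloc) "Idle" 0),
   ("Activity", PySem.Dict.getD (PySem.Dict.mk alloc) "Activity" 0),
   ("Hope", PySem.Dict.getD (PySem.Dict.mk alloc) "Hope" 0),
   ("Rage", PySem.Dict.getD (PySem.Dict.mk alloc) "Rage" 0)]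

-- recursive search: fields still to assign, remaining USP, values picked so far
def solveUsp : List (String × Int × Int) → Int → List (String × Int) → List (List (String × Int))
  | [], _, _ => []  -- unreachable (solve is always called with a nonempty field list)
  | [(name, lo, hi)], remaining, picked =>
      if lo ≤ remaining ∧ remaining ≤ hi ∧ PySem.Int.mod (remaining - lo) 2 = 0 then
        [assembleUsp (picked ++ [(name, remaining)])]
      else []
  | (name, lo, hi) :: f :: rest, remaining, picked =>
      (PySem.List.pyRange lo (hi + 1) 2).foldl
        (fun out v => out ++ solveUsp (f :: rest) (remaining - v) (picked ++ [(name, v)])) []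

def fetch_usp_values_alt (current_usp_allocation : List (String × String)) : List (List (String × Int)) :=
  -- prologue pass: total and bounds dict, one fold over the four keys
  let st := (["Idle", "Activity", "Hope", "Rage"] : List String).foldl
    (fun (st : Int × PySem.Dict String (Int × Int)) key =>
      match lookupUsp current_usp_allocation key with
      | some s =>
          let v := (PySem.Int.ofStr? s).getD 0
          let lo := v - 20
          let lo := if lo < 0 then 0 else lo
          (st.1 + v, st.2.insert key (lo, v + 20))
      | none => (st.1, st.2.insert key (0, 0)))
    (0, PySem.Dict.empty)
  let order := (["Activity", "Idle", "Hope", "Rage"] : List String)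
  solveUsp (order.map (fun n => (n, PySem.Dict.getD st.2 n (0, 0)))) st.1 []

-- ===== PRECONDITION & SPEC =====
-- Pre_ excludes exactly the inputs where Python's int(...) raises ValueError on a present key's value
def Pre_fetch_usp_values (current_usp_allocation : List (String × String)) : Prop :=
  (["Idle", "Activity", "Hope", "Rage"].all (fun k =>
    match lookupUsp current_usp_allocation k with
    | some s => (PySem.Int.ofStr? s).isSome
    | none => true)) = true
instance (current_usp_allocation : List (String × String)) : Decidable (Pre_fetch_usp_values current_usp_allocation) := by unfold Pre_fetch_usp_values; infer_instance

def pvWitness_fetch_usp_values : (List (String × String)) := [("Idle", "3"), ("Rage", "19")]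

def Spec_fetch_usp_values (current_usp_allocation : List (String × String)) (out : List (List (String × Int))) : Prop := out = fetch_usp_values_alt current_usp_allocation
instance (current_usp_allocation : List (String × String)) (out : List (List (String × Int))) : Decidable (Spec_fetch_usp_values current_usp_allocation out) := by unfold Spec_fetch_usp_values; infer_instance

-- ===== CLAIM (what is proved, stated in full; the proofs are below) =====
def Claim_equal_fetch_usp_values : Prop := ∀ (current_usp_allocation : List (String × String)), Dom_fetch_usp_values current_usp_allocation → Pre_fetch_usp_values current_usp_allocation → Spec_fetch_usp_values current_usp_allocation (fetch_usp_values current_usp_allocation)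

-- ===== LEMMAS AND PROOFS =====
lemma process_usp_fst (v : Int) : (process_usp v).1 = if v - 20 < 0 then 0 else v - 20 := by
  unfold process_usp; split_ifs <;> rfl

lemma process_usp_snd (v : Int) : (process_usp v).2 = v + 20 := by
  unfold process_usp; split_ifs <;> rfl

lemma nodup_pyRange_two (a b : Int) : (PySem.List.pyRange a b 2).Nodup := by
  rw [PySem.List.pyRange_of_pos a b (by norm_num)]
  exact List.nodup_range.map (fun x y h => by omega)

lemma filter_beq_of_nodup (l : List Int) (h : l.Nodup) (t : Int) :
    l.filter (fun r => r == t) = if t ∈ l then [t] else [] := by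
  induction l with
  | nil => simp
  | cons x xs ih =>
    rw [List.nodup_cons] at h
    by_cases hxt : x = t
    · subst hxt
      simp only [List.filter_cons, beq_self_eq_true, if_pos, List.mem_cons, true_or, ih h.2,
        if_neg h.1]
    · simp [hxt, ih h.2, Ne.symm hxt]

-- A's innermost loop, in closed form
lemma rage_loop_eq (rm rM x cu : Int) (f : Int → List (String × Int)) (acc : List (List (String × Int))) :
    (PySem.List.pyRange rm (rM + 1) 2).foldl (fun values rage =>
        if x + rage == cu then values ++ [f rage] else values) acc
    = acc ++ (if rm ≤ cu - x ∧ cu - x ≤ rM ∧ PySem.Int.mod (cu - x - rm) 2 = 0 then [f (cu - x)] else []) := by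
  rw [PySem.List.foldl_append_if (fun rage => x + rage == cu) f]
  have hc : (PySem.List.pyRange rm (rM + 1) 2).filter (fun r => x + r == cu)
      = (PySem.List.pyRange rm (rM + 1) 2).filter (fun r => r == cu - x) := by
    apply List.filter_congr
    intro r _
    apply Bool.eq_iff_iff.mpr
    simp only [beq_iff_eq]
    omega
  rw [hc, filter_beq_of_nodup _ (nodup_pyRange_two _ _)]
  have hmem := PySem.List.mem_pyRange_iff_of_pos (a := rm) (b := rM + 1) (s := 2)
    (by norm_num) (cu - x)
  by_cases hm : cu - x ∈ PySem.List.pyRange rm (rM + 1) 2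
  · obtain ⟨h1, h2, h3⟩ := hmem.mp hm
    rw [if_pos hm, if_pos ⟨h1, by omega, (PySem.Int.mod_eq_zero_iff_dvd _ _).mpr h3⟩]
    rfl
  · rw [if_neg hm, if_neg ?_]
    · rfl
    · rintro ⟨h1, h2, h3⟩
      exact hm (hmem.mpr ⟨h1, by omega, (PySem.Int.mod_eq_zero_iff_dvd _ _).mp h3⟩)

-- B's recursion at an inner field, as a flatMap
lemma solveUsp_cons (n : String) (lo hi : Int) (f : String × Int × Int)
    (rest : List (String × Int × Int)) (r : Int) (p : List (String × Int)) :
    solveUsp ((n, lo, hi) :: f :: rest) r p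
      = (PySem.List.pyRange lo (hi + 1) 2).flatMap
          (fun v => solveUsp (f :: rest) (r - v) (p ++ [(n, v)])) := by
  show (PySem.List.pyRange lo (hi + 1) 2).foldl
        (fun out v => out ++ solveUsp (f :: rest) (r - v) (p ++ [(n, v)])) [] = _
  rw [PySem.List.foldl_append_eq_flatMap]
  rfl

-- the heart: A's four nested loops equal B's recursive search, for any bounds and total
lemma loops_eq_solve (am aM im iM hm hM rm rM cu : Int) :
    (PySem.List.pyRange am (aM + 1) 2).foldl (fun values active =>
      (PySem.List.pyRange im (iM + 1) 2).foldl (fun values idle =>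
        (PySem.List.pyRange hm (hM + 1) 2).foldl (fun values hope =>
          (PySem.List.pyRange rm (rM + 1) 2).foldl (fun values rage =>
            if active + idle + hope + rage == cu then
              values ++ [[("Idle", idle), ("Activity", active), ("Hope", hope), ("Rage", rage)]]
            else values) values) values) values) []
    = solveUsp [("Activity", am, aM), ("Idle", im, iM), ("Hope", hm, hM), ("Rage", rm, rM)] cu [] := by
  have hinner : ∀ (active idle hope : Int) (acc : List (List (String × Int))),
      (PySem.List.pyRange rm (rM + 1) 2).foldl (fun values rage =>
          if active + idle + hope + rage == cu then
            values ++ [[("Idle", idle), ("Activity", active), ("Hope", hope), ("Rage", rage)]]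
          else values) acc
      = acc ++ solveUsp [("Rage", rm, rM)] (cu - active - idle - hope)
          [("Activity", active), ("Idle", idle), ("Hope", hope)] := by
    intro active idle hope acc
    have he : cu - (active + idle + hope) = cu - active - idle - hope := by ring
    rw [rage_loop_eq rm rM (active + idle + hope) cu
      (fun rage => [("Idle", idle), ("Activity", active), ("Hope", hope), ("Rage", rage)]) acc, he]
    rfl
  have hhope : ∀ (active idle : Int) (acc : List (List (String × Int))),
      (PySem.List.pyRange hm (hM + 1) 2).foldl (fun values hope =>
        (PySem.List.pyRange rm (rM + 1) 2).foldl (fun values rage =>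
          if active + idle + hope + rage == cu then
            values ++ [[("Idle", idle), ("Activity", active), ("Hope", hope), ("Rage", rage)]]
          else values) values) acc
      = acc ++ solveUsp [("Hope", hm, hM), ("Rage", rm, rM)] (cu - active - idle)
          [("Activity", active), ("Idle", idle)] := by
    intro active idle acc
    refine Eq.trans (PySem.List.foldl_congr_mem _ _ _ _
      (fun acc hope _ => hinner active idle hope acc)) ?_
    rw [PySem.List.foldl_append_eq_flatMap, solveUsp_cons]
    rfl
  have hidle : ∀ (active : Int) (acc : List (List (String × Int))),
      (PySem.List.pyRange im (iM + 1) 2).foldl (fun values idle =>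
        (PySem.List.pyRange hm (hM + 1) 2).foldl (fun values hope =>
          (PySem.List.pyRange rm (rM + 1) 2).foldl (fun values rage =>
            if active + idle + hope + rage == cu then
              values ++ [[("Idle", idle), ("Activity", active), ("Hope", hope), ("Rage", rage)]]
            else values) values) values) acc
      = acc ++ solveUsp [("Idle", im, iM), ("Hope", hm, hM), ("Rage", rm, rM)] (cu - active)
          [("Activity", active)] := by
    intro active acc
    refine Eq.trans (PySem.List.foldl_congr_mem _ _ _ _
      (fun acc idle _ => hhope active idle acc)) ?_
    rw [PySem.List.foldl_append_eq_flatMap, solveUsp_cons]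
    rfl
  refine Eq.trans (PySem.List.foldl_congr_mem _ _ _ _
    (fun acc active _ => hidle active acc)) ?_
  rw [PySem.List.foldl_append_eq_flatMap, solveUsp_cons]
  simp only [List.nil_append]

-- ===== VERDICT (by name: the statement is the Claim_ definition above) =====
theorem fetch_usp_values_spec : Claim_equal_fetch_usp_values := by
  intro cur _ _
  show fetch_usp_values cur = fetch_usp_values_alt cur
  unfold fetch_usp_values fetch_usp_values_alt uspRead
  rcases hI : lookupUsp cur "Idle" with _ | sI <;>
    rcases hA : lookupUsp cur "Activity" with _ | sA <;>
    rcases hH : lookupUsp cur "Hope" with _ | sH <;>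
    rcases hR : lookupUsp cur "Rage" with _ | sR <;>
  · refine Eq.trans (loops_eq_solve _ _ _ _ _ _ _ _ _) ?_
    simp [hI, hA, hH, hR, PySem.Dict.getD_insert, process_usp_fst, process_usp_snd]
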